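-- pv_equiv track=rewrite | github.com/bs202562/pubkeyCollect | scripts/generate_dictionary_passwords.py | generate_word_combinations
-- ===== SOURCE A (Python) =====
-- import itertools
-- from typing import Set, List, Generator
--
-- def generate_word_combinations(words: List[str], max_words: int = 3, max_combos: int = 50000) -> Generator[str, None, None]:
--     """Generate word combinations."""
--     count = 0
--
--     # Single words
--     for word in words:
--         if count >= max_combos:
--             return
--         yield word
--         count += 1
--
--     # Two-word combinations (limited)
--     if max_words >= 2:
--         # Most common words for combinations
--         combo_words = words[:100]
--         for w1, w2 in itertools.product(combo_words, repeat=2):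
--             if w1 != w2:
--                 if count >= max_combos:
--                     return
--                 yield f"{w1}{w2}"
--                 yield f"{w1} {w2}"
--                 yield f"{w1}_{w2}"
--                 count += 3
--
--     # Three-word combinations (very limited)
--     if max_words >= 3:
--         top_words = words[:30]
--         for w1, w2, w3 in itertools.permutations(top_words, 3):
--             if count >= max_combos:
--                 return
--             yield f"{w1}{w2}{w3}"
--             count += 1
-- ===== SOURCE B (Python) =====
-- import itertools
-- from typing import List, Generator
--
-- def generate_word_combinations(words: List[str], max_words: int = 3, max_combos: int = 50000) -> Generator[str, None, None]:
--     """Generate word combinations: compute each phase's cut point arithmetically, then slice."""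
--     n = len(words)
--     k1 = min(n, max(0, max_combos))
--     out = list(words[:k1])
--     if k1 == n and max_words >= 2:
--         cw = words[:100]
--         pairs = [(w1, w2) for w1 in cw for w2 in cw if w1 != w2]
--         rem = max_combos - n
--         g = min(len(pairs), (rem + 2) // 3) if rem > 0 else 0
--         for w1, w2 in pairs[:g]:
--             out.extend((f"{w1}{w2}", f"{w1} {w2}", f"{w1}_{w2}"))
--         if g == len(pairs) and max_words >= 3:
--             trips = list(itertools.permutations(words[:30], 3))
--             t = max(0, min(len(trips), max_combos - (n + 3 * len(pairs))))
--             out.extend(f"{a}{b}{c}" for a, b, c in trips[:t])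
--     yield from out
-- ===== Notes on version B (the rewrite author's own statement) =====
-- stated objective: alternative
-- what changed: A simulates the cap with a running counter threaded through three separately-guarded generator loops with early returns; B computes each phase's cut point in closed form from max_combos (min/ceil-division arithmetic) and emits slices of the candidate lists, with no counter at all.
import Mathlib
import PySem

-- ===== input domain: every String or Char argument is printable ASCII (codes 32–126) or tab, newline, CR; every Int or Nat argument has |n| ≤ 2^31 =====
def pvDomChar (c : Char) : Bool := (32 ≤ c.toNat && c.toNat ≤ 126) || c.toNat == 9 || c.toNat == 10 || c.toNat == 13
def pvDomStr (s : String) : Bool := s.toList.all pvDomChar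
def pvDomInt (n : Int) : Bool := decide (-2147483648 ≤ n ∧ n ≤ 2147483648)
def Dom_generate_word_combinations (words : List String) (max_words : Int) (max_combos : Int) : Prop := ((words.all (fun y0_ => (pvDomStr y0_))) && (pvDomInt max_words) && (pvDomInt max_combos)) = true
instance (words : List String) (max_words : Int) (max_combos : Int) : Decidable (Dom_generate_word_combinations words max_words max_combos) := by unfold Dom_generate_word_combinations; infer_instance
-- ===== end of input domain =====

-- B replaces A's counter-driven loops (with early return) by closed-form arithmetic:
-- it computes each phase's cut point from max_combos and slices, with no running counter (objective: alternative).

-- itertools.product(xs, repeat=2): all ordered pairs, left index outermost (exact).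
def pyProduct2 (xs : List String) : List (String × String) :=
  xs.flatMap (fun w1 => xs.map (fun w2 => (w1, w2)))

-- f"{w1}{w2}{w3}" applied to one element of itertools.permutations(·, 3) (always length 3).
def gwcCat3 : List String → String
  | [w1, w2, w3] => w1 ++ w2 ++ w3
  | l => String.join l

-- ===== PORT A =====
-- Each phase returns (emitted strings, some finalCount) or (emitted, none) on early `return`.
def gwcA_single : List String → Int → Int → List String × Option Int
  | [], c, _ => ([], some c)
  | w :: ws, c, m =>
    if c ≥ m then ([], none)
    else
      let r := gwcA_single ws (c + 1) m
      (w :: r.1, r.2)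

def gwcA_pairs : List (String × String) → Int → Int → List String × Option Int
  | [], c, _ => ([], some c)
  | (w1, w2) :: ps, c, m =>
    if w1 ≠ w2 then
      if c ≥ m then ([], none)
      else
        let r := gwcA_pairs ps (c + 3) m
        ((w1 ++ w2) :: (w1 ++ " " ++ w2) :: (w1 ++ "_" ++ w2) :: r.1, r.2)
    else gwcA_pairs ps c m

def gwcA_triples : List (List String) → Int → Int → List String × Option Int
  | [], c, _ => ([], some c)
  | t :: ts, c, m =>
    if c ≥ m then ([], none)
    else
      let r := gwcA_triples ts (c + 1) m
      (gwcCat3 t :: r.1, r.2)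

def generate_word_combinations (words : List String) (max_words : Int) (max_combos : Int) : List String :=
  match gwcA_single words 0 max_combos with
  | (r1, none) => r1
  | (r1, some c1) =>
    match (if 2 ≤ max_words then
             gwcA_pairs (pyProduct2 (PySem.List.slice words none (some 100))) c1 max_combos
           else ([], some c1)) with
    | (r2, none) => r1 ++ r2
    | (r2, some c2) =>
      r1 ++ r2 ++ (if 3 ≤ max_words then
                     gwcA_triples (PySem.List.permutations (PySem.List.slice words none (some 30)) 3) c2 max_combos
                   else ([], some c2)).1

-- ===== PORT B =====
-- [(w1, w2) for w1 in cw for w2 in cw if w1 != w2]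
def gwcB_pairs (cw : List String) : List (String × String) :=
  cw.flatMap (fun w1 => cw.filterMap (fun w2 => if w1 ≠ w2 then some (w1, w2) else none))

def generate_word_combinations_alt (words : List String) (max_words : Int) (max_combos : Int) : List String :=
  let n : Int := words.length
  let k1 := min n (max 0 max_combos)
  let out1 := PySem.List.slice words none (some k1)
  if k1 = n ∧ 2 ≤ max_words then
    let pairs := gwcB_pairs (PySem.List.slice words none (some 100))
    let rem := max_combos - n
    let g : Int := if 0 < rem then min (pairs.length : Int) (PySem.Int.floordiv (rem + 2) 3) else 0
    let out2 := (PySem.List.slice pairs none (some g)).flatMap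
      (fun p => [p.1 ++ p.2, p.1 ++ " " ++ p.2, p.1 ++ "_" ++ p.2])
    if g = (pairs.length : Int) ∧ 3 ≤ max_words then
      let trips := PySem.List.permutations (PySem.List.slice words none (some 30)) 3
      let t := max 0 (min (trips.length : Int) (max_combos - (n + 3 * (pairs.length : Int))))
      out1 ++ out2 ++ (PySem.List.slice trips none (some t)).map gwcCat3
    else out1 ++ out2
  else out1

-- ===== PRECONDITION & SPEC =====
def Spec_generate_word_combinations (words : List String) (max_words : Int) (max_combos : Int) (out : List String) : Prop := out = generate_word_combinations_alt words max_words max_combos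
instance (words : List String) (max_words : Int) (max_combos : Int) (out : List String) : Decidable (Spec_generate_word_combinations words max_words max_combos out) := by unfold Spec_generate_word_combinations; infer_instance

-- ===== CLAIM (what is proved, stated in full; the proofs are below) =====
def Claim_equal_generate_word_combinations : Prop := ∀ (words : List String) (max_words : Int) (max_combos : Int), Dom_generate_word_combinations words max_words max_combos → Spec_generate_word_combinations words max_words max_combos (generate_word_combinations words max_words max_combos)

-- ===== LEMMAS AND PROOFS =====

theorem slice_to_nonneg {α : Type} (xs : List α) (b : Int) (h : 0 ≤ b) :
    PySem.List.slice xs none (some b) = xs.take b.toNat := by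
  have hb : ¬ b < 0 := by omega
  simp [PySem.List.slice, PySem.List.clampIdx, hb, List.take_eq_take_iff]

-- A's phase 1 in closed form: it emits a prefix and succeeds iff the whole list fits under the cap.
theorem singles_char (m : Int) : ∀ (ws : List String) (c : Int),
    gwcA_single ws c m = (ws.take (min (ws.length : Int) (m - c)).toNat,
      if (ws.length : Int) ≤ max 0 (m - c) then some (c + ws.length) else none)
  | [], c => by simp [gwcA_single]
  | w :: ws, c => by
    rw [gwcA_single]
    by_cases h : c ≥ m
    · have h1 : (min (((w :: ws).length : Int)) (m - c)).toNat = 0 := by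
        simp only [List.length_cons]; push_cast; omega
      have h2 : ¬ ((((w :: ws).length : Int)) ≤ max 0 (m - c)) := by
        simp only [List.length_cons]; push_cast; omega
      rw [if_pos h, if_neg h2, h1, List.take_zero]
    · have h1 : (min (((w :: ws).length : Int)) (m - c)).toNat
          = (min ((ws.length : Int)) (m - (c + 1))).toNat + 1 := by
        simp only [List.length_cons]; push_cast; omega
      have h2 : ((((w :: ws).length : Int)) ≤ max 0 (m - c))
          ↔ (((ws.length : Int)) ≤ max 0 (m - (c + 1))) := by
        simp only [List.length_cons]; push_cast; omega
      have h4 : c + 1 + ((ws.length : Int)) = c + (((w :: ws).length : Int)) := by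
        simp only [List.length_cons]; push_cast; ring
      rw [if_neg h]
      show (w :: (gwcA_single ws (c + 1) m).1, (gwcA_single ws (c + 1) m).2) = _
      rw [singles_char m ws (c + 1), h1, List.take_succ_cons]
      by_cases h3 : ((ws.length : Int)) ≤ max 0 (m - (c + 1))
      · rw [if_pos h3, if_pos (h2.mpr h3), h4]
      · rw [if_neg h3, if_neg (fun hx => h3 (h2.mp hx))]
  termination_by ws => ws.length

-- A's phase 3 in closed form (same shape as phase 1, mapping gwcCat3).
theorem triples_char (m : Int) : ∀ (ts : List (List String)) (c : Int),
    gwcA_triples ts c m = ((ts.take (min (ts.length : Int) (m - c)).toNat).map gwcCat3,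
      if (ts.length : Int) ≤ max 0 (m - c) then some (c + ts.length) else none)
  | [], c => by simp [gwcA_triples]
  | t :: ts, c => by
    rw [gwcA_triples]
    by_cases h : c ≥ m
    · have h1 : (min (((t :: ts).length : Int)) (m - c)).toNat = 0 := by
        simp only [List.length_cons]; push_cast; omega
      have h2 : ¬ ((((t :: ts).length : Int)) ≤ max 0 (m - c)) := by
        simp only [List.length_cons]; push_cast; omega
      rw [if_pos h, if_neg h2, h1, List.take_zero, List.map_nil]
    · have h1 : (min (((t :: ts).length : Int)) (m - c)).toNat
          = (min ((ts.length : Int)) (m - (c + 1))).toNat + 1 := by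
        simp only [List.length_cons]; push_cast; omega
      have h2 : ((((t :: ts).length : Int)) ≤ max 0 (m - c))
          ↔ (((ts.length : Int)) ≤ max 0 (m - (c + 1))) := by
        simp only [List.length_cons]; push_cast; omega
      have h4 : c + 1 + ((ts.length : Int)) = c + (((t :: ts).length : Int)) := by
        simp only [List.length_cons]; push_cast; ring
      rw [if_neg h]
      show (gwcCat3 t :: (gwcA_triples ts (c + 1) m).1, (gwcA_triples ts (c + 1) m).2) = _
      rw [triples_char m ts (c + 1), h1, List.take_succ_cons, List.map_cons]
      by_cases h3 : ((ts.length : Int)) ≤ max 0 (m - (c + 1))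
      · rw [if_pos h3, if_pos (h2.mpr h3), h4]
      · rw [if_neg h3, if_neg (fun hx => h3 (h2.mp hx))]
  termination_by ts => ts.length

-- ceil((m-c)/3) clamped at 0: how many eligible pair-groups fit under the cap.
def gwcCeil (r : Int) : Int := if 0 < r then (r + 2) / 3 else 0

theorem gwcCeil_nonneg (r : Int) : 0 ≤ gwcCeil r := by
  unfold gwcCeil; split_ifs <;> omega

-- A's phase 2 in closed form over the eligible (w1 ≠ w2) sublist.
theorem pairs_char (m : Int) : ∀ (ps : List (String × String)) (c : Int),
    gwcA_pairs ps c m =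
      (((ps.filter (fun p => p.1 ≠ p.2)).take
          (min ((ps.filter (fun p => p.1 ≠ p.2)).length : Int) (gwcCeil (m - c))).toNat).flatMap
        (fun p => [p.1 ++ p.2, p.1 ++ " " ++ p.2, p.1 ++ "_" ++ p.2]),
       if ((ps.filter (fun p => p.1 ≠ p.2)).length : Int) ≤ gwcCeil (m - c)
       then some (c + 3 * (ps.filter (fun p => p.1 ≠ p.2)).length) else none)
  | [], c => by
    have := gwcCeil_nonneg (m - c)
    simp [gwcA_pairs]
    omega
  | (w1, w2) :: ps, c => by
    rw [gwcA_pairs]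
    by_cases hw : w1 = w2
    · rw [if_neg (by simpa using hw), List.filter_cons_of_neg (by simpa using hw)]
      exact pairs_char m ps c
    · rw [if_pos (by simpa using hw), List.filter_cons_of_pos (by simpa using hw)]
      by_cases h : c ≥ m
      · have hc : gwcCeil (m - c) = 0 := by unfold gwcCeil; rw [if_neg (by omega)]
        have h1 : (min ((((w1, w2) :: ps.filter (fun p => p.1 ≠ p.2)).length : Int)) (gwcCeil (m - c))).toNat = 0 := by
          rw [hc]; simp only [List.length_cons]; push_cast; omega
        have h2 : ¬ ((((w1, w2) :: ps.filter (fun p => p.1 ≠ p.2)).length : Int) ≤ gwcCeil (m - c)) := by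
          rw [hc]; simp only [List.length_cons]; push_cast; omega
        rw [if_pos h, if_neg h2, h1, List.take_zero, List.flatMap_nil]
      · have hceil : gwcCeil (m - c) = gwcCeil (m - (c + 3)) + 1 := by
          unfold gwcCeil; split_ifs <;> omega
        have hnn := gwcCeil_nonneg (m - (c + 3))
        have h1 : (min ((((w1, w2) :: ps.filter (fun p => p.1 ≠ p.2)).length : Int)) (gwcCeil (m - c))).toNat
            = (min (((ps.filter (fun p => p.1 ≠ p.2)).length : Int)) (gwcCeil (m - (c + 3)))).toNat + 1 := by
          rw [hceil]; simp only [List.length_cons]; push_cast; omega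
        have h2 : ((((w1, w2) :: ps.filter (fun p => p.1 ≠ p.2)).length : Int) ≤ gwcCeil (m - c))
            ↔ (((ps.filter (fun p => p.1 ≠ p.2)).length : Int) ≤ gwcCeil (m - (c + 3))) := by
          rw [hceil]; simp only [List.length_cons]; push_cast; omega
        have h4 : c + 3 + 3 * ((ps.filter (fun p => p.1 ≠ p.2)).length : Int)
            = c + 3 * ((((w1, w2) :: ps.filter (fun p => p.1 ≠ p.2)).length : Int)) := by
          simp only [List.length_cons]; push_cast; ring
        rw [if_neg h]
        show ((w1 ++ w2) :: (w1 ++ " " ++ w2) :: (w1 ++ "_" ++ w2) :: (gwcA_pairs ps (c + 3) m).1,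
            (gwcA_pairs ps (c + 3) m).2) = _
        rw [pairs_char m ps (c + 3), h1, List.take_succ_cons, List.flatMap_cons]
        by_cases h3 : (((ps.filter (fun p => p.1 ≠ p.2)).length : Int)) ≤ gwcCeil (m - (c + 3))
        · rw [if_pos h3, if_pos (h2.mpr h3), h4]; rfl
        · rw [if_neg h3, if_neg (fun hx => h3 (h2.mp hx))]; rfl
  termination_by ps => ps.length

-- One row of the comprehension: filterMap with an if-guard is filter-after-map.
theorem filterMap_ne_row (w1 : String) (l : List String) :
    l.filterMap (fun w2 => if w1 ≠ w2 then some (w1, w2) else none)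
      = (l.map (fun w2 => (w1, w2))).filter (fun p => p.1 ≠ p.2) := by
  induction l with
  | nil => rfl
  | cons w2 ws ih =>
    rw [List.filterMap_cons, List.map_cons, List.filter_cons]
    by_cases h : w1 = w2
    · rw [if_neg (by simp [h]), if_neg (by simp [h])]
      exact ih
    · rw [if_pos (by simp [h]), if_pos (by simp [h]), ih]

-- B's pair comprehension is the filtered product A walks.
theorem pairs_list_eq (cw : List String) :
    gwcB_pairs cw = (pyProduct2 cw).filter (fun p => p.1 ≠ p.2) := by
  unfold gwcB_pairs pyProduct2
  rw [List.filter_flatMap]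
  exact List.flatMap_congr (fun w1 _ => filterMap_ne_row w1 cw)

-- ===== VERDICT (by name: the statement is the Claim_ definition above) =====
theorem generate_word_combinations_spec : Claim_equal_generate_word_combinations := by
  intro words mw mc _
  show generate_word_combinations words mw mc = generate_word_combinations_alt words mw mc
  unfold generate_word_combinations generate_word_combinations_alt
  rw [singles_char, pairs_list_eq]
  dsimp only
  set n : Int := (words.length : Int) with hn
  set E : List (String × String) :=
    ((pyProduct2 (PySem.List.slice words none (some 100))).filter (fun p => p.1 ≠ p.2)) with hE
  set T : List (List String) :=
    PySem.List.permutations (PySem.List.slice words none (some 30)) 3 with hT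
  by_cases hfull : n ≤ max 0 (mc - 0)
  · -- phase 1 completes
    have hk1 : min n (max 0 mc) = n := by omega
    rw [if_pos hfull, hk1]
    dsimp only
    have hout1 : PySem.List.slice words none (some n) = words.take (min n (mc - 0)).toNat := by
      rw [slice_to_nonneg words n (by omega)]
      congr 1
      omega
    by_cases h2 : 2 ≤ mw
    · rw [if_pos h2, if_pos ⟨rfl, h2⟩, pairs_char]
      have hgceil : (if 0 < mc - n then min (E.length : Int) (PySem.Int.floordiv (mc - n + 2) 3) else 0)
          = min (E.length : Int) (gwcCeil (mc - (0 + n))) := by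
        unfold gwcCeil
        by_cases hp : 0 < mc - n
        · rw [if_pos hp, if_pos (by omega : 0 < mc - (0 + n)),
            PySem.Int.floordiv_eq_ediv_of_pos (by omega : (0:Int) < 3)]
          congr 2
          omega
        · rw [if_neg hp, if_neg (by omega : ¬ 0 < mc - (0 + n))]
          have : 0 ≤ (E.length : Int) := by positivity
          omega
      rw [hgceil]
      have hgnn : 0 ≤ min (E.length : Int) (gwcCeil (mc - (0 + n))) := by
        have := gwcCeil_nonneg (mc - (0 + n))
        have : 0 ≤ (E.length : Int) := by positivity
        omega
      have hout2 : PySem.List.slice E none (some (min (E.length : Int) (gwcCeil (mc - (0 + n)))))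
          = E.take (min (E.length : Int) (gwcCeil (mc - (0 + n)))).toNat := by
        rw [slice_to_nonneg E _ hgnn]
      by_cases hps : (E.length : Int) ≤ gwcCeil (mc - (0 + n))
      · -- phase 2 completes
        have hge : min (E.length : Int) (gwcCeil (mc - (0 + n))) = (E.length : Int) := by omega
        rw [if_pos hps]
        dsimp only
        by_cases h3 : 3 ≤ mw
        · rw [if_pos h3, if_pos (show min (E.length : Int) (gwcCeil (mc - (0 + n))) = (E.length : Int) ∧ 3 ≤ mw from ⟨hge, h3⟩), triples_char]
          have ht : PySem.List.slice T none
                (some (max 0 (min (T.length : Int) (mc - (n + 3 * (E.length : Int))))))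
              = T.take (min (T.length : Int) (mc - (0 + n + 3 * E.length))).toNat := by
            rw [slice_to_nonneg T _ (by omega)]
            congr 1
            omega
          rw [ht, hout1, hout2]
        · rw [if_neg h3,
            if_neg (show ¬(min (E.length : Int) (gwcCeil (mc - (0 + n))) = (E.length : Int) ∧ 3 ≤ mw) from fun hx => h3 hx.2),
            hout1, hout2]
          dsimp only
          rw [List.append_nil]
      · have hlt : ¬ (min (E.length : Int) (gwcCeil (mc - (0 + n))) = (E.length : Int)) := by
          have := gwcCeil_nonneg (mc - (0 + n))
          omega
        rw [if_neg hps]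
        dsimp only
        rw [if_neg (fun hx => hlt hx.1), hout1, hout2]
    · rw [if_neg h2]
      dsimp only
      rw [if_neg (by omega : ¬ 3 ≤ mw),
        if_neg (show ¬(n = n ∧ 2 ≤ mw) from fun hx => h2 hx.2), hout1]
      dsimp only
      rw [List.append_nil, List.append_nil]
  · -- phase 1 returns early
    have hk1 : ¬ (min n (max 0 mc) = n ∧ 2 ≤ mw) := by
      rintro ⟨hx, -⟩
      omega
    have hmin : (min n (mc - 0)).toNat = (min n (max 0 mc)).toNat := by omega
    rw [if_neg hfull, if_neg hk1]
    dsimp only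
    rw [slice_to_nonneg words _ (by omega : (0:Int) ≤ min n (max 0 mc)), hmin]
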